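-- pv_equiv track=rewrite | github.com/AIOTISolucoes/USINA | api.py | infer_step_minutes
-- ===== SOURCE A (Python) =====
-- def infer_step_minutes(labels):
--     mins = []
--     for s in labels or []:
--         try:
--             hh, mm = map(int, str(s).split(":"))
--             mins.append(hh * 60 + mm)
--         except Exception:
--             continue
--
--     if len(mins) < 2:
--         return 5
--
--     diffs = []
--     for i in range(1, len(mins)):
--         d = mins[i] - mins[i - 1]
--         if d > 0 and d <= 60:
--             diffs.append(d)
--
--     return min(diffs) if diffs else 5
-- ===== SOURCE B (Python) =====
-- def infer_step_minutes(labels):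
--     def parse(s):
--         try:
--             hh, mm = map(int, str(s).split(":"))
--             return hh * 60 + mm
--         except Exception:
--             return None
--
--     mins = [m for m in (parse(s) for s in labels or []) if m is not None]
--     pairs = list(zip(mins, mins[1:]))
--     for d in range(1, 61):
--         if any(b - a == d for a, b in pairs):
--             return d
--     return 5
-- ===== Notes on version B (the rewrite author's own statement) =====
-- stated objective: alternative
-- what changed: A collects all valid consecutive diffs into a list and takes min(); B searches the bounded answer space instead: it scans candidate steps d = 1..60 in increasing order and returns the first d that occurs as a consecutive difference of the parsed minutes, correct because every valid diff lies in [1,60] so the first candidate hit is exactly the minimum.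
import Mathlib
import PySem

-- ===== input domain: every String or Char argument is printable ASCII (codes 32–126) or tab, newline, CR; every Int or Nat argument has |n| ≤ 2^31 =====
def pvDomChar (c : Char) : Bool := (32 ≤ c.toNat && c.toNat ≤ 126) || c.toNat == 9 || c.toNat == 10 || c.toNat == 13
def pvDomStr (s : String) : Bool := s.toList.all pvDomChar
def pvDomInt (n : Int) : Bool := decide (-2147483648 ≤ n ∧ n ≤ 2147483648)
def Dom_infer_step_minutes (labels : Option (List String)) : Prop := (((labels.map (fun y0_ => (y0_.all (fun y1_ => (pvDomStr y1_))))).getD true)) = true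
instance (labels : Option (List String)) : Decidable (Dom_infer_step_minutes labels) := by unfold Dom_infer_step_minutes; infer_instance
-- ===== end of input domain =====

-- B replaces A's "collect all valid diffs, then min()" by a search over the bounded
-- answer space: scan candidate steps d = 1..60 and return the first one that occurs
-- as a consecutive difference of the parsed minutes (objective: alternative).

-- shared parse helper: `hh, mm = map(int, str(s).split(":"))` succeeds iff the split has
-- exactly two parts and both parse as Python ints; any failure is caught by `except`.
def pvParse (s : String) : Option Int :=
  match PySem.Str.split? s ":" with
  | some [a, b] =>
    match PySem.Int.ofStr? a, PySem.Int.ofStr? b with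
    | some hh, some mm => some (hh * 60 + mm)
    | _, _ => none
  | _ => none

-- ===== PORT A =====
def infer_step_minutes (labels : Option (List String)) : Int :=
  let mins : List Int := (labels.getD []).foldl
    (fun mins s =>
      match pvParse s with
      | some m => mins ++ [m]
      | none => mins) []
  if mins.length < 2 then 5
  else
    let diffs : List Int := (PySem.List.pyRange 1 (PySem.List.len mins) 1).foldl
      (fun diffs i =>
        let d := PySem.List.pyGetD mins i 0 - PySem.List.pyGetD mins (i - 1) 0
        if 0 < d ∧ d ≤ 60 then diffs ++ [d] else diffs) []
    match PySem.List.min? diffs (fun x => x) with  -- `min(diffs) if diffs else 5`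
    | some m => m
    | none => 5

-- ===== PORT B =====
-- `for d in range(1, 61): if any(b - a == d for a, b in pairs): return d` / `return 5`
def pvSearch (pairs : List (Int × Int)) : List Int → Int
  | [] => 5
  | d :: ds => if pairs.any (fun p => p.2 - p.1 == d) then d else pvSearch pairs ds

def infer_step_minutes_alt (labels : Option (List String)) : Int :=
  let mins : List Int := (labels.getD []).filterMap pvParse
  let pairs : List (Int × Int) := mins.zip (PySem.List.slice mins (some 1) none)
  pvSearch pairs (PySem.List.pyRange 1 61 1)

-- ===== PRECONDITION & SPEC =====
def Spec_infer_step_minutes (labels : Option (List String)) (out : Int) : Prop := out = infer_step_minutes_alt labels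
instance (labels : Option (List String)) (out : Int) : Decidable (Spec_infer_step_minutes labels out) := by unfold Spec_infer_step_minutes; infer_instance

-- ===== CLAIM =====
def Claim_equal_infer_step_minutes : Prop := ∀ (labels : Option (List String)), Dom_infer_step_minutes labels → Spec_infer_step_minutes labels (infer_step_minutes labels)

-- ===== LEMMAS AND PROOFS =====

-- the list of valid consecutive diffs of `l`, with `p` the previous value (if any)
def pvDiffs : Option Int → List Int → List Int
  | _, [] => []
  | none, x :: l => pvDiffs (some x) l
  | some p, x :: l => (if 0 < x - p ∧ x - p ≤ 60 then [x - p] else []) ++ pvDiffs (some x) l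

theorem pvA_mins (ls : List String) (acc : List Int) :
    ls.foldl (fun mins s => match pvParse s with | some m => mins ++ [m] | none => mins) acc
      = acc ++ ls.filterMap pvParse := by
  induction ls generalizing acc with
  | nil => simp
  | cons s t ih => cases h : pvParse s <;> simp [h, ih]

theorem pvA_diffs (rest : List Int) (pre : List Int) (x : Int) (acc : List Int) :
    (PySem.List.pyRange ((pre.length : Int) + 1) ((pre.length : Int) + 1 + rest.length) 1).foldl
      (fun diffs i =>
        let d := PySem.List.pyGetD (pre ++ x :: rest) i 0 - PySem.List.pyGetD (pre ++ x :: rest) (i - 1) 0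
        if 0 < d ∧ d ≤ 60 then diffs ++ [d] else diffs) acc
      = acc ++ pvDiffs (some x) rest := by
  induction rest generalizing pre x acc with
  | nil =>
    rw [PySem.List.pyRange_one_eq_nil (by simp)]
    simp [pvDiffs]
  | cons y rs ih =>
    rw [PySem.List.pyRange_one_cons (by simp only [List.length_cons]; push_cast; omega)]
    rw [List.foldl_cons]
    have h1 : PySem.List.pyGetD (pre ++ x :: y :: rs) ((pre.length : Int) + 1) 0 = y := by
      rw [show ((pre.length : Int) + 1) = ((pre.length + 1 : Nat) : Int) by push_cast; ring]
      rw [PySem.List.pyGetD_natCast]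
      simp [List.getD_eq_getElem?_getD]
    have h2 : PySem.List.pyGetD (pre ++ x :: y :: rs) ((pre.length : Int) + 1 - 1) 0 = x := by
      rw [show ((pre.length : Int) + 1 - 1) = ((pre.length : Nat) : Int) by ring]
      rw [PySem.List.pyGetD_natCast]
      simp [List.getD_eq_getElem?_getD]
    simp only [h1, h2]
    have hlen : ((pre.length : Int) + 1 + 1) = (((pre ++ [x]).length : Int) + 1) := by
      simp
    have hend : ((pre.length : Int) + 1 + ((y :: rs).length : Int))
        = (((pre ++ [x]).length : Int) + 1 + (rs.length : Int)) := by simp; ring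
    have happ : pre ++ x :: y :: rs = (pre ++ [x]) ++ y :: rs := by simp
    have hd : pvDiffs (some x) (y :: rs)
        = (if 0 < y - x ∧ y - x ≤ 60 then [y - x] else []) ++ pvDiffs (some y) rs := rfl
    by_cases h : 0 < y - x ∧ y - x ≤ 60
    · rw [if_pos h, hlen, hend, happ, ih (pre ++ [x]) y, hd, if_pos h]
      simp
    · rw [if_neg h, hlen, hend, happ, ih (pre ++ [x]) y, hd, if_neg h]
      simp

-- A computes exactly: min of the valid consecutive diffs of the parsed minutes, default 5
theorem pvA_char (labels : Option (List String)) :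
    infer_step_minutes labels
      = (match PySem.List.min? (pvDiffs none ((labels.getD []).filterMap pvParse)) (fun x => x) with
         | some v => v
         | none => 5) := by
  unfold infer_step_minutes
  rw [pvA_mins, List.nil_append]
  match h : (labels.getD []).filterMap pvParse with
  | [] => rfl
  | [a] => rfl
  | a :: b :: t =>
    have hlen : ¬ (a :: b :: t).length < 2 := by simp
    rw [if_neg hlen]
    have hr := pvA_diffs (b :: t) [] a []
    simp only [List.length_nil, Nat.cast_zero, List.nil_append, zero_add] at hr
    have hlen2 : (PySem.List.len (a :: b :: t)) = (1 : Int) + ((b :: t).length : Int) := by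
      simp only [PySem.List.len_eq, List.length_cons]; push_cast; ring
    rw [hlen2, hr]
    rfl

-- the valid-diff list is the filtered diff map over consecutive pairs
theorem pvDiffs_eq_filter (rest : List Int) (a : Int) :
    pvDiffs (some a) rest
      = (((a :: rest).zip rest).map (fun p => p.2 - p.1)).filter
          (fun d => decide (0 < d) && decide (d ≤ 60)) := by
  induction rest generalizing a with
  | nil => rfl
  | cons y rs ih =>
    show (if 0 < y - a ∧ y - a ≤ 60 then [y - a] else []) ++ pvDiffs (some y) rs = _
    rw [ih]
    simp only [List.zip_cons_cons, List.map_cons, List.filter_cons]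
    by_cases h : 0 < y - a ∧ y - a ≤ 60
    · rw [if_pos h, if_pos (by simp [h.2]; omega)]
      simp
    · rw [if_neg h, if_neg (by simpa using h)]
      simp
  
-- the hit test of B's inner `any`
def pvHit (pairs : List (Int × Int)) (d : Int) : Prop := ∃ p ∈ pairs, p.2 - p.1 = d

theorem pvHit_any (pairs : List (Int × Int)) (d : Int) :
    (pairs.any (fun p => p.2 - p.1 == d)) = true ↔ pvHit pairs d := by
  simp [pvHit, List.any_eq_true]

theorem pvHit_iff_mem_diffs (m : List Int) (d : Int) (h1 : 1 ≤ d) (h2 : d ≤ 60) :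
    pvHit (m.zip m.tail) d ↔ d ∈ pvDiffs none m := by
  cases m with
  | nil => simp [pvHit, pvDiffs]
  | cons a rest =>
    show pvHit ((a :: rest).zip rest) d ↔ d ∈ pvDiffs (some a) rest
    rw [pvDiffs_eq_filter]
    constructor
    · rintro ⟨p, hp, hd⟩
      refine List.mem_filter.mpr ⟨List.mem_map.mpr ⟨p, hp, hd⟩, ?_⟩
      simp; omega
    · intro hmem
      obtain ⟨hmap, _⟩ := List.mem_filter.mp hmem
      obtain ⟨p, hp, hd⟩ := List.mem_map.mp hmap
      exact ⟨p, hp, hd⟩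

theorem pvSearch_miss (pairs : List (Int × Int)) (l : List Int)
    (h : ∀ d ∈ l, ¬ pvHit pairs d) : pvSearch pairs l = 5 := by
  induction l with
  | nil => rfl
  | cons d ds ih =>
    show (if pairs.any (fun p => p.2 - p.1 == d) then d else pvSearch pairs ds) = 5
    rw [if_neg (by
      intro hh
      exact h d (List.mem_cons_self) ((pvHit_any pairs d).mp (by simpa using hh)))]
    exact ih (fun x hx => h x (List.mem_cons_of_mem _ hx))

theorem pvSearch_found (pairs : List (Int × Int)) (l1 l2 : List Int) (μ : Int)
    (hmiss : ∀ d ∈ l1, ¬ pvHit pairs d) (hμ : pvHit pairs μ) :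
    pvSearch pairs (l1 ++ μ :: l2) = μ := by
  induction l1 with
  | nil =>
    show (if pairs.any (fun p => p.2 - p.1 == μ) then μ else _) = μ
    rw [if_pos (by simpa using (pvHit_any pairs μ).mpr hμ)]
  | cons d ds ih =>
    show (if pairs.any (fun p => p.2 - p.1 == d) then d else pvSearch pairs (ds ++ μ :: l2)) = μ
    rw [if_neg (by
      intro hh
      exact hmiss d (List.mem_cons_self) ((pvHit_any pairs d).mp (by simpa using hh)))]
    exact ih (fun x hx => hmiss x (List.mem_cons_of_mem _ hx))

theorem pvB_char (m : List Int) :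
    pvSearch (m.zip m.tail) (PySem.List.pyRange 1 61 1)
      = (match PySem.List.min? (pvDiffs none m) (fun x => x) with
         | some v => v
         | none => 5) := by
  match hmin : PySem.List.min? (pvDiffs none m) (fun x => x) with
  | none =>
    have hD : pvDiffs none m = [] := (PySem.List.min?_eq_none_iff _ _).mp hmin
    refine pvSearch_miss _ _ ?_
    intro d hd hhit
    have hdm := PySem.List.mem_pyRange_one.mp hd
    have hmem : d ∈ pvDiffs none m :=
      (pvHit_iff_mem_diffs m d (by omega) (by omega)).mp hhit
    rw [hD] at hmem
    exact absurd hmem (List.not_mem_nil)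
  | some mu =>
    have hmem : mu ∈ pvDiffs none m := PySem.List.min?_mem hmin
    have hmin' : ∀ y ∈ pvDiffs none m, mu ≤ y := fun y hy => PySem.List.min?_id_le hmin y hy
    -- bounds on mu from the filter shape of pvDiffs
    have hbounds : 1 ≤ mu ∧ mu ≤ 60 := by
      cases m with
      | nil => simp [pvDiffs] at hmem
      | cons a rest =>
        have hmem' : mu ∈ pvDiffs (some a) rest := hmem
        rw [pvDiffs_eq_filter] at hmem'
        have := (List.mem_filter.mp hmem').2
        simp at this
        omega
    have hhit : pvHit (m.zip m.tail) mu :=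
      (pvHit_iff_mem_diffs m mu hbounds.1 hbounds.2).mpr hmem
    have hsplit : PySem.List.pyRange 1 61 1
        = PySem.List.pyRange 1 mu 1 ++ mu :: PySem.List.pyRange (mu + 1) 61 1 := by
      rw [PySem.List.pyRange_one_append 1 mu 61 (by omega) (by omega)]
      congr 1
      exact PySem.List.pyRange_one_cons (by omega)
    rw [hsplit]
    refine pvSearch_found _ _ _ mu ?_ hhit
    intro d hd hhit'
    have hdm := PySem.List.mem_pyRange_one.mp hd
    have hmemd : d ∈ pvDiffs none m :=
      (pvHit_iff_mem_diffs m d (by omega) (by omega)).mp hhit'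
    have := hmin' d hmemd
    omega

theorem infer_both_eq (labels : Option (List String)) :
    infer_step_minutes labels = infer_step_minutes_alt labels := by
  rw [pvA_char]
  unfold infer_step_minutes_alt
  simp only [PySem.List.slice_from_one]
  exact (pvB_char ((labels.getD []).filterMap pvParse)).symm

-- ===== VERDICT =====
theorem infer_step_minutes_spec : Claim_equal_infer_step_minutes := by
  intro labels _
  unfold Spec_infer_step_minutes
  exact infer_both_eq labels
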